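-- pv_equiv track=rewrite | github.com/r-1317/AtCoder | 2025/AHC043/a05.py | get_near_commuter
-- ===== SOURCE A (Python) =====
-- def get_near_commuter(home_list: list, workplace_list: list) -> list:
--   near_commuter_list = []
--   for i in range(len(home_list)):
--     for j in range(i + 1, len(home_list)):
--       xh1, yh1 = home_list[i]
--       xw1, yw1 = workplace_list[i]
--       xh2, yh2 = home_list[j]
--       xw2, yw2 = workplace_list[j]
--       for dxh, dyh in ((2, 0), (-2, 0), (0, 2), (0, -2), (1, 1), (1, -1), (-1, 1), (-1, -1)):
--         for dxw, dyw in ((2, 0), (-2, 0), (0, 2), (0, -2), (1, 1), (1, -1), (-1, 1), (-1, -1)):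
--           xsh, ysh = xh1 + dxh, yh1 + dyh
--           xsw, ysw = xw1 + dxw, yw1 + dyw
--           if (xsh, ysh) == (xh2, yh2) and (xsw, ysw) == (xw2, yw2):
--             near_commuter_list.append((i, j, (xsh, ysh), (xsw, ysw)))
--
--   return near_commuter_list
-- ===== SOURCE B (Python) =====
-- OFFSETS = ((2, 0), (-2, 0), (0, 2), (0, -2), (1, 1), (1, -1), (-1, 1), (-1, -1))
--
--
-- def get_near_commuter(home_list: list, workplace_list: list) -> list:
--   n = len(home_list)
--   index = {}
--   for j in range(n):
--     index.setdefault((home_list[j], workplace_list[j]), []).append(j)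
--   near_commuter_list = []
--   for i in range(n):
--     xh, yh = home_list[i]
--     xw, yw = workplace_list[i]
--     js = []
--     for dxh, dyh in OFFSETS:
--       for dxw, dyw in OFFSETS:
--         key = ((xh + dxh, yh + dyh), (xw + dxw, yw + dyw))
--         for j in index.get(key, ()):
--           if j > i:
--             js.append(j)
--     js.sort()
--     for j in js:
--       near_commuter_list.append((i, j, home_list[j], workplace_list[j]))
--   return near_commuter_list
-- ===== Notes on version B (the rewrite author's own statement) =====
-- stated objective: faster
-- what changed: Replaces A's all-pairs scan (for every i<j, test all 64 home/workplace offset combinations) by a hash index from (home, workplace) to its index list built once, probing the 64 offset targets per person i and sorting the matching j's.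
-- outside the precondition, e.g. on get_near_commuter([(0, 0)], []): A returns [], B raises IndexError
import Mathlib
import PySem

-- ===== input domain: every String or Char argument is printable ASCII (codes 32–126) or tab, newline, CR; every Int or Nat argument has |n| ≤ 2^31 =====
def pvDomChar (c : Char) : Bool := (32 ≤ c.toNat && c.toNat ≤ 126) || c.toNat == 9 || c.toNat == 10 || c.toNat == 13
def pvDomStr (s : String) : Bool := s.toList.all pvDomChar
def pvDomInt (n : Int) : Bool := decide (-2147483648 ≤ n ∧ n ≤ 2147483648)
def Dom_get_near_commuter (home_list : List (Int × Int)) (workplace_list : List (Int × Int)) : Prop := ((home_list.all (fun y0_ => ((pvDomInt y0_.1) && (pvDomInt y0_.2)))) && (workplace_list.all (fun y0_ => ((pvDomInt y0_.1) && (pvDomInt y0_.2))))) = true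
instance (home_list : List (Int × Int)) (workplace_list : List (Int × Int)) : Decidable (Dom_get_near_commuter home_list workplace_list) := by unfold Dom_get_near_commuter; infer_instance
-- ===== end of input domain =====

-- B replaces A's all-pairs offset scan by a hash index over (home, workplace) keys probed at
-- the 64 offset targets per person, with matches sorted by j (objective: faster).

-- the literal offset tuple both Python sources iterate over
def pvOffsets : List (Int × Int) := [(2, 0), (-2, 0), (0, 2), (0, -2), (1, 1), (1, -1), (-1, 1), (-1, -1)]

-- ===== PORT A =====
def get_near_commuter (home_list : List (Int × Int)) (workplace_list : List (Int × Int)) : List (Int × Int × (Int × Int) × (Int × Int)) :=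
  (PySem.List.pyRange 0 (home_list.length : Int) 1).foldl (fun near_commuter_list i =>
    (PySem.List.pyRange (i + 1) (home_list.length : Int) 1).foldl (fun near_commuter_list j =>
      let h1 := PySem.List.pyGetD home_list i (0, 0)
      let w1 := PySem.List.pyGetD workplace_list i (0, 0)
      let h2 := PySem.List.pyGetD home_list j (0, 0)
      let w2 := PySem.List.pyGetD workplace_list j (0, 0)
      pvOffsets.foldl (fun near_commuter_list dh =>
        pvOffsets.foldl (fun near_commuter_list dw =>
          if (h1.1 + dh.1, h1.2 + dh.2) = h2 ∧ (w1.1 + dw.1, w1.2 + dw.2) = w2 then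
            near_commuter_list ++ [(i, j, (h1.1 + dh.1, h1.2 + dh.2), (w1.1 + dw.1, w1.2 + dw.2))]
          else near_commuter_list) near_commuter_list) near_commuter_list) near_commuter_list) []

-- ===== PORT B =====
-- for j in range(n): index.setdefault((home_list[j], workplace_list[j]), []).append(j)
def pvBuildIndex (home_list : List (Int × Int)) (workplace_list : List (Int × Int)) : PySem.Dict ((Int × Int) × (Int × Int)) (List Int) :=
  (PySem.List.pyRange 0 (home_list.length : Int) 1).foldl (fun index j =>
    index.modify (PySem.List.pyGetD home_list j (0, 0), PySem.List.pyGetD workplace_list j (0, 0)) [] (· ++ [j])) PySem.Dict.empty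

def get_near_commuter_alt (home_list : List (Int × Int)) (workplace_list : List (Int × Int)) : List (Int × Int × (Int × Int) × (Int × Int)) :=
  let index := pvBuildIndex home_list workplace_list
  (PySem.List.pyRange 0 (home_list.length : Int) 1).foldl (fun near_commuter_list i =>
    let h1 := PySem.List.pyGetD home_list i (0, 0)
    let w1 := PySem.List.pyGetD workplace_list i (0, 0)
    let js := pvOffsets.foldl (fun js dh =>
      pvOffsets.foldl (fun js dw =>
        (index.getD ((h1.1 + dh.1, h1.2 + dh.2), (w1.1 + dw.1, w1.2 + dw.2)) []).foldl
          (fun js j => if j > i then js ++ [j] else js) js) js) []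
    (PySem.List.sorted js (fun x => x) false).foldl
      (fun near_commuter_list j =>
        near_commuter_list ++ [(i, j, PySem.List.pyGetD home_list j (0, 0), PySem.List.pyGetD workplace_list j (0, 0))])
      near_commuter_list) []

-- ===== PRECONDITION & SPEC =====
-- Pre_ excludes inputs where workplace_list is shorter than home_list: there Python A raises
-- IndexError — except in the degenerate len(home_list) ≤ 1 case, where A returns [] without ever
-- reading workplace_list while B's index build does read it and raises.
def Pre_get_near_commuter (home_list : List (Int × Int)) (workplace_list : List (Int × Int)) : Prop :=
  home_list.length ≤ workplace_list.length
instance (home_list : List (Int × Int)) (workplace_list : List (Int × Int)) : Decidable (Pre_get_near_commuter home_list workplace_list) := by unfold Pre_get_near_commuter; infer_instance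

def pvWitness_get_near_commuter : (List (Int × Int)) × (List (Int × Int)) := ([(0, 0), (2, 0)], [(5, 5), (6, 6)])

def Spec_get_near_commuter (home_list : List (Int × Int)) (workplace_list : List (Int × Int)) (out : List (Int × Int × (Int × Int) × (Int × Int))) : Prop := out = get_near_commuter_alt home_list workplace_list
instance (home_list : List (Int × Int)) (workplace_list : List (Int × Int)) (out : List (Int × Int × (Int × Int) × (Int × Int))) : Decidable (Spec_get_near_commuter home_list workplace_list out) := by unfold Spec_get_near_commuter; infer_instance

-- ===== CLAIM (what is proved, stated in full; the proofs are below) =====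
def Claim_equal_get_near_commuter : Prop := ∀ (home_list : List (Int × Int)) (workplace_list : List (Int × Int)), Dom_get_near_commuter home_list workplace_list → Pre_get_near_commuter home_list workplace_list → Spec_get_near_commuter home_list workplace_list (get_near_commuter home_list workplace_list)

-- ===== LEMMAS AND PROOFS =====

-- the Bool condition both programs detect for a pair i < j: both coordinate differences are offsets
def pvCond (home_list : List (Int × Int)) (workplace_list : List (Int × Int)) (i j : Int) : Bool :=
  decide (((PySem.List.pyGetD home_list j (0, 0)).1 - (PySem.List.pyGetD home_list i (0, 0)).1,
           (PySem.List.pyGetD home_list j (0, 0)).2 - (PySem.List.pyGetD home_list i (0, 0)).2) ∈ pvOffsets) &&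
  decide (((PySem.List.pyGetD workplace_list j (0, 0)).1 - (PySem.List.pyGetD workplace_list i (0, 0)).1,
           (PySem.List.pyGetD workplace_list j (0, 0)).2 - (PySem.List.pyGetD workplace_list i (0, 0)).2) ∈ pvOffsets)

-- the coordinate-difference key of a pair
def pvDiff (home_list : List (Int × Int)) (workplace_list : List (Int × Int)) (i j : Int) : (Int × Int) × (Int × Int) :=
  (((PySem.List.pyGetD home_list j (0, 0)).1 - (PySem.List.pyGetD home_list i (0, 0)).1,
    (PySem.List.pyGetD home_list j (0, 0)).2 - (PySem.List.pyGetD home_list i (0, 0)).2),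
   ((PySem.List.pyGetD workplace_list j (0, 0)).1 - (PySem.List.pyGetD workplace_list i (0, 0)).1,
    (PySem.List.pyGetD workplace_list j (0, 0)).2 - (PySem.List.pyGetD workplace_list i (0, 0)).2))

def pvP64 : List ((Int × Int) × (Int × Int)) := pvOffsets.flatMap (fun a => pvOffsets.map (fun b => (a, b)))

-- the common normal form of both programs
def pvCanon (home_list : List (Int × Int)) (workplace_list : List (Int × Int)) : List (Int × Int × (Int × Int) × (Int × Int)) :=
  (PySem.List.pyRange 0 (home_list.length : Int) 1).flatMap (fun i =>
    ((PySem.List.pyRange (i + 1) (home_list.length : Int) 1).filter (fun j => pvCond home_list workplace_list i j)).map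
      (fun j => (i, j, PySem.List.pyGetD home_list j (0, 0), PySem.List.pyGetD workplace_list j (0, 0))))

lemma pv_filter_eq_singleton_of_nodup {α : Type} [DecidableEq α] (l : List α) (hl : l.Nodup) (c : α) :
    l.filter (fun x => decide (x = c)) = if c ∈ l then [c] else [] := by
  induction l with
  | nil => simp
  | cons a t ih =>
    rcases List.nodup_cons.mp hl with ⟨ha, ht⟩
    by_cases hac : a = c
    · subst hac
      have h0 : t.filter (fun x => decide (x = a)) = [] := by
        apply List.filter_eq_nil_iff.mpr
        intro x hx
        simp only [decide_eq_true_eq]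
        rintro rfl; exact ha hx
      simp [h0]
    · have hca : ¬ c = a := fun h => hac h.symm
      simp [hac, ih ht, List.mem_cons, hca]

lemma pv_flatMap_ite_singleton {α β : Type} (l : List α) (p : α → Prop) [DecidablePred p] (g : α → β) :
    l.flatMap (fun x => if p x then [g x] else []) = (l.filter (fun x => decide (p x))).map g := by
  induction l with
  | nil => rfl
  | cons a t ih =>
    by_cases hp : p a <;> simp [hp, ih]

lemma pv_flatMap_map' {α β γ : Type} (l : List β) (f : β → α) (g : α → List γ) :
    (l.map f).flatMap g = l.flatMap (fun b => g (f b)) := by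
  induction l with
  | nil => rfl
  | cons b t ih => simp [ih]

lemma pv_flatMap_flatMap_pair {α β γ : Type} (l1 : List α) (l2 : List β) (g : α → β → List γ) :
    l1.flatMap (fun a => l2.flatMap (fun b => g a b)) = (l1.flatMap (fun a => l2.map (fun b => (a, b)))).flatMap (fun p => g p.1 p.2) := by
  rw [List.flatMap_assoc]
  apply List.flatMap_congr
  intro a _
  rw [pv_flatMap_map']

lemma pv_perm_filter_append_disjoint {α : Type} (l : List α) (A B : α → Bool)
    (h : ∀ x, ¬(A x = true ∧ B x = true)) :
    (l.filter A ++ l.filter B).Perm (l.filter (fun x => A x || B x)) := by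
  induction l with
  | nil => simp
  | cons x t ih =>
    cases hA : A x
    · cases hB : B x
      · simpa [List.filter_cons, hA, hB] using ih
      · simp only [List.filter_cons, hA, hB, Bool.false_or]
        exact (List.perm_middle).trans (ih.cons x)
    · have hB : B x = false := by
        cases hBx : B x
        · rfl
        · exact absurd ⟨hA, hBx⟩ (h x)
      simp only [List.filter_cons, hA, hB, Bool.true_or]
      exact (ih.cons x)

lemma pv_perm_flatMap_filter {α β : Type} [DecidableEq β] (f : α → β) (p : α → Bool) :
    ∀ (P : List β) (l : List α), P.Nodup → ∀ (m : β → Bool), (∀ b, m b = true ↔ b ∈ P) →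
    (P.flatMap (fun d => l.filter (fun x => p x && decide (f x = d)))).Perm
      (l.filter (fun x => p x && m (f x))) := by
  intro P
  induction P with
  | nil =>
    intro l _ m hm
    have hnil : l.filter (fun x => p x && m (f x)) = [] := by
      apply List.filter_eq_nil_iff.mpr
      intro x _
      have hm0 : m (f x) = false := by
        cases h : m (f x)
        · rfl
        · exact absurd ((hm (f x)).mp h) (by simp)
      simp [hm0]
    rw [hnil]
    simp
  | cons d P ih =>
    intro l hP m hm
    rcases List.nodup_cons.mp hP with ⟨hd, hP'⟩
    simp only [List.flatMap_cons]
    refine (List.Perm.append_left _ (ih l hP' (fun b => decide (b ∈ P)) (fun b => by simp))).trans ?_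
    refine (pv_perm_filter_append_disjoint l _ _ ?_).trans ?_
    · rintro x ⟨h1, h2⟩
      simp only [Bool.and_eq_true, decide_eq_true_eq] at h1 h2
      exact hd (h1.2 ▸ h2.2)
    · have he : (fun x => (p x && decide (f x = d)) || (p x && decide (f x ∈ P))) = (fun x => p x && m (f x)) := by
        funext x
        rw [Bool.eq_iff_iff]
        simp only [Bool.or_eq_true, Bool.and_eq_true, decide_eq_true_eq]
        constructor
        · rintro (⟨hp, h⟩ | ⟨hp, h⟩)
          · exact ⟨hp, (hm _).mpr (by simp [h])⟩
          · exact ⟨hp, (hm _).mpr (by simp [h])⟩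
        · rintro ⟨hp, h⟩
          rcases List.mem_cons.mp ((hm _).mp h) with h' | h'
          · exact Or.inl ⟨hp, h'⟩
          · exact Or.inr ⟨hp, h'⟩
      rw [he]

lemma pv_A_dw (i j : Int) (h1 w1 h2 w2 dh : Int × Int) (acc : List (Int × Int × (Int × Int) × (Int × Int))) :
    pvOffsets.foldl (fun near_commuter_list dw =>
        if (h1.1 + dh.1, h1.2 + dh.2) = h2 ∧ (w1.1 + dw.1, w1.2 + dw.2) = w2 then
          near_commuter_list ++ [(i, j, (h1.1 + dh.1, h1.2 + dh.2), (w1.1 + dw.1, w1.2 + dw.2))]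
        else near_commuter_list) acc
      = acc ++ (if dh = (h2.1 - h1.1, h2.2 - h1.2) ∧ (w2.1 - w1.1, w2.2 - w1.2) ∈ pvOffsets then [(i, j, h2, w2)] else []) := by
  rw [PySem.List.foldl_append_ite]
  congr 1
  have hfe : (fun dw : Int × Int => decide ((h1.1 + dh.1, h1.2 + dh.2) = h2 ∧ (w1.1 + dw.1, w1.2 + dw.2) = w2))
      = (fun dw : Int × Int => decide (dh = (h2.1 - h1.1, h2.2 - h1.2) ∧ dw = (w2.1 - w1.1, w2.2 - w1.2))) := by
    funext dw
    rw [decide_eq_decide]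
    simp only [Prod.ext_iff]
    omega
  rw [hfe]
  by_cases hdh : dh = (h2.1 - h1.1, h2.2 - h1.2)
  · subst hdh
    have hfe2 : (fun dw : Int × Int => decide ((h2.1 - h1.1, h2.2 - h1.2) = (h2.1 - h1.1, h2.2 - h1.2) ∧ dw = (w2.1 - w1.1, w2.2 - w1.2)))
        = (fun dw : Int × Int => decide (dw = (w2.1 - w1.1, w2.2 - w1.2))) := by
      funext dw; simp
    rw [hfe2, pv_filter_eq_singleton_of_nodup _ (by decide)]
    by_cases hw : (w2.1 - w1.1, w2.2 - w1.2) ∈ pvOffsets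
    · rw [if_pos hw, if_pos ⟨rfl, hw⟩]
      have h2e : h1.1 + (h2.1 - h1.1) = h2.1 ∧ h1.2 + (h2.2 - h1.2) = h2.2 := by omega
      have w2e : w1.1 + (w2.1 - w1.1) = w2.1 ∧ w1.2 + (w2.2 - w1.2) = w2.2 := by omega
      simp [h2e.1, h2e.2, w2e.1, w2e.2]
    · rw [if_neg hw, if_neg (fun h => hw h.2)]
      simp
  · have hfe3 : (fun dw : Int × Int => decide (dh = (h2.1 - h1.1, h2.2 - h1.2) ∧ dw = (w2.1 - w1.1, w2.2 - w1.2)))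
        = (fun _ : Int × Int => false) := by
      funext dw; simp [hdh]
    rw [hfe3, if_neg (fun h => hdh h.1)]
    simp

lemma pv_A_64 (i j : Int) (h1 w1 h2 w2 : Int × Int) (acc : List (Int × Int × (Int × Int) × (Int × Int))) :
    pvOffsets.foldl (fun near_commuter_list dh =>
        pvOffsets.foldl (fun near_commuter_list dw =>
          if (h1.1 + dh.1, h1.2 + dh.2) = h2 ∧ (w1.1 + dw.1, w1.2 + dw.2) = w2 then
            near_commuter_list ++ [(i, j, (h1.1 + dh.1, h1.2 + dh.2), (w1.1 + dw.1, w1.2 + dw.2))]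
          else near_commuter_list) near_commuter_list) acc
      = acc ++ (if (h2.1 - h1.1, h2.2 - h1.2) ∈ pvOffsets ∧ (w2.1 - w1.1, w2.2 - w1.2) ∈ pvOffsets then [(i, j, h2, w2)] else []) := by
  simp only [pv_A_dw]
  rw [PySem.List.foldl_append_eq_flatMap]
  congr 1
  by_cases hw : (w2.1 - w1.1, w2.2 - w1.2) ∈ pvOffsets
  · simp only [hw, and_true]
    rw [pv_flatMap_ite_singleton pvOffsets (fun dh => dh = (h2.1 - h1.1, h2.2 - h1.2)) (fun _ => (i, j, h2, w2)),
      pv_filter_eq_singleton_of_nodup _ (by decide)]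
    by_cases hh : (h2.1 - h1.1, h2.2 - h1.2) ∈ pvOffsets <;> simp [hh]
  · simp [hw]

lemma pv_A_eq_canon (home_list workplace_list : List (Int × Int)) :
    get_near_commuter home_list workplace_list = pvCanon home_list workplace_list := by
  unfold get_near_commuter
  simp only [pv_A_64, PySem.List.foldl_append_eq_flatMap, List.nil_append]
  unfold pvCanon
  apply List.flatMap_congr
  intro i _
  rw [pv_flatMap_ite_singleton]
  congr 1
  apply List.filter_congr
  intro j _
  rw [Bool.decide_and]
  rfl

lemma pv_bucket (home_list workplace_list : List (Int × Int)) (c : (Int × Int) × (Int × Int)) :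
    (pvBuildIndex home_list workplace_list).getD c []
      = (PySem.List.pyRange 0 (home_list.length : Int) 1).filter
          (fun j => (PySem.List.pyGetD home_list j (0, 0), PySem.List.pyGetD workplace_list j (0, 0)) == c) := by
  unfold pvBuildIndex
  have hmap : (PySem.List.pyRange 0 (home_list.length : Int) 1).foldl (fun index j =>
        index.modify (PySem.List.pyGetD home_list j (0, 0), PySem.List.pyGetD workplace_list j (0, 0)) [] (· ++ [j])) PySem.Dict.empty
      = ((PySem.List.pyRange 0 (home_list.length : Int) 1).map
          (fun j => ((PySem.List.pyGetD home_list j (0, 0), PySem.List.pyGetD workplace_list j (0, 0)), j))).foldl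
          (fun index p => index.modify p.1 [] (· ++ [p.2])) PySem.Dict.empty := by
    simp only [List.foldl_map]
  rw [hmap, PySem.Dict.getD_foldl_modify_append]
  rw [show ((PySem.Dict.empty : PySem.Dict ((Int × Int) × (Int × Int)) (List Int)).getD c []) = [] from rfl,
    List.nil_append, List.filter_map, List.map_map]
  simp [Function.comp_def]

lemma pv_key_eq (home_list workplace_list : List (Int × Int)) (i : Int) (dh dw : Int × Int) (j : Int) :
    ((PySem.List.pyGetD home_list j (0, 0), PySem.List.pyGetD workplace_list j (0, 0))
        == (((PySem.List.pyGetD home_list i (0, 0)).1 + dh.1, (PySem.List.pyGetD home_list i (0, 0)).2 + dh.2),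
            ((PySem.List.pyGetD workplace_list i (0, 0)).1 + dw.1, (PySem.List.pyGetD workplace_list i (0, 0)).2 + dw.2)))
      = decide (pvDiff home_list workplace_list i j = (dh, dw)) := by
  rw [Bool.eq_iff_iff]
  simp only [beq_iff_eq, decide_eq_true_eq, pvDiff, Prod.ext_iff]
  omega

lemma pv_mem_P64 (pq : (Int × Int) × (Int × Int)) : pq ∈ pvP64 ↔ (pq.1 ∈ pvOffsets ∧ pq.2 ∈ pvOffsets) := by
  obtain ⟨a, b⟩ := pq
  simp only [pvP64, List.mem_flatMap, List.mem_map, Prod.mk.injEq]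
  constructor
  · rintro ⟨x, hx, y, hy, rfl, rfl⟩; exact ⟨hx, hy⟩
  · rintro ⟨ha, hb⟩; exact ⟨a, ha, b, hb, rfl, rfl⟩

lemma pv_js (home_list workplace_list : List (Int × Int)) (i : Int) (h0 : 0 ≤ i) (hn : i < (home_list.length : Int)) :
    PySem.List.sorted
      (pvOffsets.foldl (fun js dh =>
        pvOffsets.foldl (fun js dw =>
          ((pvBuildIndex home_list workplace_list).getD
              (((PySem.List.pyGetD home_list i (0, 0)).1 + dh.1, (PySem.List.pyGetD home_list i (0, 0)).2 + dh.2),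
               ((PySem.List.pyGetD workplace_list i (0, 0)).1 + dw.1, (PySem.List.pyGetD workplace_list i (0, 0)).2 + dw.2)) []).foldl
            (fun js j => if j > i then js ++ [j] else js) js) js) [])
      (fun x => x) false
      = (PySem.List.pyRange (i + 1) (home_list.length : Int) 1).filter (fun j => pvCond home_list workplace_list i j) := by
  simp only [PySem.List.foldl_append_ite_eq_filter, PySem.List.foldl_append_eq_flatMap, List.nil_append]
  simp only [pv_bucket, List.filter_filter, pv_key_eq]
  rw [pv_flatMap_flatMap_pair pvOffsets pvOffsets
      (fun dh dw => (PySem.List.pyRange 0 (home_list.length : Int) 1).filter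
        (fun j => decide (j > i) && decide (pvDiff home_list workplace_list i j = (dh, dw))))]
  have hre : ∀ p ∈ pvP64,
      (PySem.List.pyRange 0 (home_list.length : Int) 1).filter
          (fun j => decide (j > i) && decide (pvDiff home_list workplace_list i j = (p.1, p.2)))
        = (PySem.List.pyRange 0 (home_list.length : Int) 1).filter
            (fun j => decide (j > i) && decide (pvDiff home_list workplace_list i j = p)) := by
    intro p _; rw [Prod.mk.eta]
  rw [show (pvOffsets.flatMap fun a => pvOffsets.map fun b => (a, b)) = pvP64 from rfl,
    List.flatMap_congr hre]
  have hperm0 := pv_perm_flatMap_filter (pvDiff home_list workplace_list i) (fun j => decide (j > i))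
    pvP64 (PySem.List.pyRange 0 (home_list.length : Int) 1) (by decide)
    (fun b => decide (b ∈ pvP64)) (fun b => by simp)
  have hperm : (pvP64.flatMap (fun d => (PySem.List.pyRange 0 (home_list.length : Int) 1).filter
        (fun j => decide (j > i) && decide (pvDiff home_list workplace_list i j = d)))).Perm
      ((PySem.List.pyRange 0 (home_list.length : Int) 1).filter
        (fun j => decide (j > i) && decide (pvDiff home_list workplace_list i j ∈ pvP64))) := hperm0
  have htarget : (PySem.List.pyRange 0 (home_list.length : Int) 1).filter
        (fun j => decide (j > i) && decide (pvDiff home_list workplace_list i j ∈ pvP64))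
      = (PySem.List.pyRange (i + 1) (home_list.length : Int) 1).filter (fun j => pvCond home_list workplace_list i j) := by
    rw [PySem.List.pyRange_one_append 0 (i + 1) (home_list.length : Int) (by omega) (by omega), List.filter_append]
    have hnil : (PySem.List.pyRange 0 (i + 1) 1).filter
        (fun j => decide (j > i) && decide (pvDiff home_list workplace_list i j ∈ pvP64)) = [] := by
      apply List.filter_eq_nil_iff.mpr
      intro x hx
      have hx' := PySem.List.mem_pyRange_one.mp hx
      simp only [gt_iff_lt, Bool.and_eq_true, decide_eq_true_eq, not_and]
      intro h; omega
    rw [hnil, List.nil_append]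
    apply List.filter_congr
    intro j hj
    have hj' := PySem.List.mem_pyRange_one.mp hj
    rw [Bool.eq_iff_iff]
    simp only [Bool.and_eq_true, decide_eq_true_eq, pv_mem_P64, pvCond, pvDiff]
    constructor
    · rintro ⟨-, h⟩; exact h
    · intro h; exact ⟨by omega, h⟩
  rw [htarget] at hperm
  refine PySem.List.sorted_eq_of_perm_of_pairwise_lt _ _ _ hperm.symm ?_
  exact List.Pairwise.filter _ (PySem.List.pairwise_lt_pyRange_one _ _)

lemma pv_B_eq_canon (home_list workplace_list : List (Int × Int)) :
    get_near_commuter_alt home_list workplace_list = pvCanon home_list workplace_list := by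
  unfold get_near_commuter_alt
  simp only [PySem.List.foldl_append_singleton_eq_map, PySem.List.foldl_append_eq_flatMap, List.nil_append]
  unfold pvCanon
  apply List.flatMap_congr
  intro i hi
  obtain ⟨h0, hn⟩ := PySem.List.mem_pyRange_one.mp hi
  rw [pv_js home_list workplace_list i h0 hn]

-- ===== VERDICT (by name: the statement is the Claim_ definition above) =====
theorem get_near_commuter_spec : Claim_equal_get_near_commuter := by
  intro home_list workplace_list _ _
  unfold Spec_get_near_commuter
  rw [pv_A_eq_canon, pv_B_eq_canon]
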